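-- pv_equiv track=rewrite | github.com/vercah/string-attractors | pal_closure_module.py | compare_attrs
-- ===== SOURCE A (Python) =====
-- def compare_attrs(fst_attrs, snd_attrs):
--     similar = [] # list of pairs of similar attractors
--
--     for fst_attr in fst_attrs:
--         for snd_attr in snd_attrs:
--             if (len(fst_attr) == len(snd_attr)):
--                 fst_attr.sort()
--                 snd_attr.sort()
--                 sim_flag = True
--                 for i in range(len(fst_attr)):
--                     if abs(fst_attr[i] - snd_attr[i]) > 1:
--                         sim_flag = False
--                         break
--                 if sim_flag:
--                     similar.append((fst_attr, snd_attr))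
--
--     return similar
-- ===== SOURCE B (Python) =====
-- def compare_attrs(fst_attrs, snd_attrs):
--     # Group snd_attrs by length once, then a single pass over fst_attrs with a dict lookup.
--     groups = {}
--     for snd_attr in snd_attrs:
--         groups.setdefault(len(snd_attr), []).append(snd_attr)
--     similar = []
--     for fst_attr in fst_attrs:
--         group = groups.get(len(fst_attr))
--         if group:
--             fst_attr.sort()
--             for snd_attr in group:
--                 snd_attr.sort()
--                 if all(abs(a - b) <= 1 for a, b in zip(fst_attr, snd_attr)):
--                     similar.append((fst_attr, snd_attr))
--     return similar
-- ===== Notes on version B (the rewrite author's own statement) =====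
-- stated objective: alternative
-- what changed: B replaces A's all-pairs length scan with a dict that groups snd_attrs by length once, so each fst_attr only visits the snd_attrs of matching length.
import Mathlib
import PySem

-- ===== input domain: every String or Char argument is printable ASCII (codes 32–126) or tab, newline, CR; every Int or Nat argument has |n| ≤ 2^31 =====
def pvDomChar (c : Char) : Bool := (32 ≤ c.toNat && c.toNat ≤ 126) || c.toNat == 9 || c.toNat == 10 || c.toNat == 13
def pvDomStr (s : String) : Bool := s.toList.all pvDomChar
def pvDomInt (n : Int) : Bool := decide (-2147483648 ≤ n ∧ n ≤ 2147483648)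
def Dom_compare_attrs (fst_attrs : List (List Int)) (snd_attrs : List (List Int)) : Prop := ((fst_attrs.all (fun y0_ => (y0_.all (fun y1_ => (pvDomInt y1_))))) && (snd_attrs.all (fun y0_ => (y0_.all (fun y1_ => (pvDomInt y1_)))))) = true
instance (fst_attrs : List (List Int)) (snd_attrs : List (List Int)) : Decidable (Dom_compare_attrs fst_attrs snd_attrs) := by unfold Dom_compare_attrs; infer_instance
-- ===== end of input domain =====

-- B groups snd_attrs by length in one dict pass, so A's all-pairs length scan disappears.
-- Both Pythons sort the input lists IN PLACE (identically); the equivalence proved here is about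
-- the RETURN value (the ports compute the sorted values directly, which is value-exact because
-- sorting is idempotent and every appended pair holds the freshly sorted lists).

-- ===== PORT A =====
-- A's inner 'for i in range(len(fst_attr)): if abs(...) > 1: break' over two equal-length lists
def simFlagA : List Int → List Int → Bool
  | x :: xs, y :: ys => if (x - y).natAbs > 1 then false else simFlagA xs ys
  | _, _ => true

def compare_attrs (fst_attrs : List (List Int)) (snd_attrs : List (List Int)) : List (List Int × List Int) :=
  fst_attrs.foldl (fun similar fst_attr =>
    snd_attrs.foldl (fun similar snd_attr =>
      if PySem.List.len fst_attr == PySem.List.len snd_attr then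
        -- fst_attr.sort(); snd_attr.sort() (in place; value-wise the sorted lists)
        let f := PySem.List.sorted fst_attr (fun x => x) false
        let s := PySem.List.sorted snd_attr (fun x => x) false
        if simFlagA f s then similar ++ [(f, s)] else similar
      else similar) similar) []

-- ===== PORT B =====
def compare_attrs_alt (fst_attrs : List (List Int)) (snd_attrs : List (List Int)) : List (List Int × List Int) :=
  -- groups.setdefault(len(snd_attr), []).append(snd_attr)
  let groups := snd_attrs.foldl (fun d s => d.modify (PySem.List.len s) [] (· ++ [s])) PySem.Dict.empty
  fst_attrs.foldl (fun similar fst_attr =>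
    -- 'group = groups.get(len(fst_attr)); if group:' — None and [] are both falsy, so getD []/isEmpty is exact
    let grp := groups.getD (PySem.List.len fst_attr) []
    if grp.isEmpty then similar
    else
      let fs := PySem.List.sorted fst_attr (fun x => x) false
      grp.foldl (fun sim snd_attr =>
        let ss := PySem.List.sorted snd_attr (fun x => x) false
        if (fs.zip ss).all (fun p => decide ((p.1 - p.2).natAbs ≤ 1)) then sim ++ [(fs, ss)] else sim)
        similar) []

-- ===== PRECONDITION & SPEC =====
def Spec_compare_attrs (fst_attrs : List (List Int)) (snd_attrs : List (List Int)) (out : List (List Int × List Int)) : Prop := out = compare_attrs_alt fst_attrs snd_attrs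
instance (fst_attrs : List (List Int)) (snd_attrs : List (List Int)) (out : List (List Int × List Int)) : Decidable (Spec_compare_attrs fst_attrs snd_attrs out) := by unfold Spec_compare_attrs; infer_instance

-- ===== CLAIM (what is proved, stated in full; the proofs are below) =====
def Claim_equal_compare_attrs : Prop := ∀ (fst_attrs : List (List Int)) (snd_attrs : List (List Int)), Dom_compare_attrs fst_attrs snd_attrs → Spec_compare_attrs fst_attrs snd_attrs (compare_attrs fst_attrs snd_attrs)

-- ===== LEMMAS AND PROOFS =====

-- A's break-loop equals B's zip-all check
lemma simFlagA_eq_zip_all (xs ys : List Int) :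
    simFlagA xs ys = (xs.zip ys).all (fun p => decide ((p.1 - p.2).natAbs ≤ 1)) := by
  induction xs generalizing ys with
  | nil => simp [simFlagA]
  | cons x xs ih =>
    cases ys with
    | nil => simp [simFlagA]
    | cons y ys =>
      simp only [simFlagA, List.zip_cons_cons, List.all_cons, ih]
      by_cases h : (x - y).natAbs > 1
      · simp [h]
      · simp [h, Nat.le_of_not_lt h]

-- the dict B builds holds, at key L, exactly the snd_attrs of length L in input order
lemma groups_getD (snd_attrs : List (List Int)) (L : Int) :
    (snd_attrs.foldl (fun d s => d.modify (s.length : Int) [] (· ++ [s])) PySem.Dict.empty).getD L []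
      = snd_attrs.filter (fun s => ((s.length : Int) == L)) := by
  have h := PySem.Dict.getD_foldl_modify_append
      (l := snd_attrs.map (fun s => ((s.length : Int), s)))
      (d := (PySem.Dict.empty : PySem.Dict Int (List (List Int)))) (c := L)
  rw [List.foldl_map] at h
  simpa [List.filter_map, List.map_map, Function.comp_def] using h

theorem compare_attrs_spec : Claim_equal_compare_attrs := by
  intro fst_attrs snd_attrs _
  unfold Spec_compare_attrs
  simp only [compare_attrs, compare_attrs_alt, PySem.List.len]
  simp only [groups_getD]
  refine PySem.List.foldl_congr_mem _ _ _ _ (fun similar fst_attr _ => ?_)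
  -- A's inner fold with the nested guards as a single-guard append fold
  have hA : snd_attrs.foldl (fun similar snd_attr =>
      if ((fst_attr.length : Int) == (snd_attr.length : Int)) then
        let f := PySem.List.sorted fst_attr (fun x => x) false
        let s := PySem.List.sorted snd_attr (fun x => x) false
        if simFlagA f s then similar ++ [(f, s)] else similar
      else similar) similar
      = snd_attrs.foldl (fun acc snd_attr =>
          if (((snd_attr.length : Int) == (fst_attr.length : Int))
              && ((PySem.List.sorted fst_attr (fun x => x) false).zip
                    (PySem.List.sorted snd_attr (fun x => x) false)).all
                  (fun p => decide ((p.1 - p.2).natAbs ≤ 1))) then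
            acc ++ [(PySem.List.sorted fst_attr (fun x => x) false,
                     PySem.List.sorted snd_attr (fun x => x) false)]
          else acc) similar := by
    refine PySem.List.foldl_congr_mem _ _ _ _ (fun acc s _ => ?_)
    by_cases h1 : fst_attr.length = s.length
    · have hb1 : ((fst_attr.length : Int) == (s.length : Int)) = true := by simp [h1]
      have hb2 : ((s.length : Int) == (fst_attr.length : Int)) = true := by simp [h1]
      simp only [hb1, hb2, Bool.true_and, if_true, simFlagA_eq_zip_all]
    · have hb1 : ((fst_attr.length : Int) == (s.length : Int)) = false := by
        simp only [beq_eq_false_iff_ne, ne_eq, Nat.cast_inj]; omega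
      have hb2 : ((s.length : Int) == (fst_attr.length : Int)) = false := by
        simp only [beq_eq_false_iff_ne, ne_eq, Nat.cast_inj]; omega
      rw [hb1, hb2]
      simp
  rw [hA, PySem.List.foldl_append_if]
  by_cases hgrp : snd_attrs.filter (fun s => ((s.length : Int) == (fst_attr.length : Int))) = []
  · have hPempty : snd_attrs.filter (fun s =>
        ((s.length : Int) == (fst_attr.length : Int))
          && ((PySem.List.sorted fst_attr (fun x => x) false).zip
                (PySem.List.sorted s (fun x => x) false)).all
              (fun p => decide ((p.1 - p.2).natAbs ≤ 1))) = [] := by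
      rw [List.filter_eq_nil_iff] at hgrp ⊢
      intro a ha hc
      exact hgrp a ha (by simpa using (Bool.and_eq_true_iff.mp hc).1)
    rw [hPempty]
    simp [hgrp]
  · simp only [List.isEmpty_iff]
    rw [if_neg hgrp, PySem.List.foldl_append_if, List.filter_filter]
    refine congrArg _ (congrArg _ (List.filter_congr (fun a _ => ?_)))
    exact (Bool.and_comm _ _)
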